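-- pv_equiv track=rewrite | github.com/shanevcantwell/prompt-prix | prompt_prix/parsers.py | parse_servers_input
-- ===== SOURCE A (Python) =====
-- def parse_servers_input(servers_text: str) -> list[str]:
--     """Parse newline or comma-separated server list."""
--     servers = []
--     for line in servers_text.strip().split("\n"):
--         for item in line.split(","):
--             item = item.strip()
--             if item:
--                 servers.append(item)
--     return servers
-- ===== SOURCE B (Python) =====
-- def parse_servers_input(servers_text: str) -> list[str]:
--     """Parse newline or comma-separated server list: single pass over the
--     characters, flushing the current token at each delimiter."""
--     servers = []
--     buf = []
--     for ch in servers_text + "\n":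
--         if ch in "\n,":
--             token = "".join(buf).strip()
--             if token:
--                 servers.append(token)
--             buf = []
--         else:
--             buf.append(ch)
--     return servers
-- ===== Notes on version B (the rewrite author's own statement) =====
-- stated objective: alternative
-- what changed: Replaces the nested strip-then-split-on-newlines-then-split-on-commas loops by a single left-to-right character scan that accumulates a token buffer and flushes it (stripped, dropped if empty) at each delimiter character.
import Mathlib
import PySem

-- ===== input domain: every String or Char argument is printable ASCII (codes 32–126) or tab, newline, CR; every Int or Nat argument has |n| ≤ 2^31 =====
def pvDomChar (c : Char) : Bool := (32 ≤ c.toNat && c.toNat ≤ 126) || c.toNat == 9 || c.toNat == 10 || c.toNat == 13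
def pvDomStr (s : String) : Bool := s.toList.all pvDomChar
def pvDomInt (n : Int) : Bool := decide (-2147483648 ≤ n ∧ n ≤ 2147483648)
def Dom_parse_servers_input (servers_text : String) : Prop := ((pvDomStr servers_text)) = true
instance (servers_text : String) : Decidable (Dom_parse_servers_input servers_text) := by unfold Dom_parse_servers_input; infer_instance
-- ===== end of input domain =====

-- B replaces A's nested split("\n")/split(",") loops by one character scan with a token buffer (objective: alternative, same cost).

-- ===== PORT A =====
-- strings are handled as their character lists (PySem.Chars.* are the exact Python string primitives)
def parse_servers_input (servers_text : String) : List String :=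
  (PySem.Chars.splitOn (PySem.Str.strip servers_text).toList ['\n']).foldl
    (fun servers line =>
      (PySem.Chars.splitOn line [',']).foldl
        (fun servers item =>
          let item2 := PySem.Chars.strip item
          if item2 ≠ [] then servers ++ [String.ofList item2] else servers)
        servers)
    []

-- ===== PORT B =====
-- one step of B's scan: flush the buffer at a delimiter, else extend it
def pvStep (st : List String × List Char) (ch : Char) : List String × List Char :=
  if ch = '\n' ∨ ch = ',' then
    let token := PySem.Str.strip (String.ofList st.2)
    (if token ≠ "" then st.1 ++ [token] else st.1, [])
  else (st.1, st.2 ++ [ch])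

def parse_servers_input_alt (servers_text : String) : List String :=
  ((servers_text.toList ++ ['\n']).foldl pvStep ([], [])).1

-- ===== PRECONDITION & SPEC =====
def Spec_parse_servers_input (servers_text : String) (out : List String) : Prop := out = parse_servers_input_alt servers_text
instance (servers_text : String) (out : List String) : Decidable (Spec_parse_servers_input servers_text out) := by unfold Spec_parse_servers_input; infer_instance

-- ===== CLAIM (what is proved, stated in full; the proofs are below) =====
def Claim_equal_parse_servers_input : Prop := ∀ (servers_text : String), Dom_parse_servers_input servers_text → Spec_parse_servers_input servers_text (parse_servers_input servers_text)

-- ===== LEMMAS AND PROOFS =====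

-- the delimiter predicate both programs split on
def pvDelim (c : Char) : Bool := c == '\n' || c == ','

-- the common token normalisation: strip every token, drop empties, pack to String
def pvF (ts : List (List Char)) : List String :=
  ((ts.map PySem.Chars.strip).filter (· ≠ [])).map (fun t => String.ofList t)

-- modify the last element of a list
def pvML (g : List Char → List Char) : List (List Char) → List (List Char)
  | [] => []
  | [t] => [g t]
  | t :: ts => t :: pvML g ts

theorem pv_go (d : Char) (fuel : ℕ) : ∀ (l cur : List Char) (acc : List (List Char)),
    l.length ≤ fuel →
    PySem.Chars.splitOn.go [d] fuel l cur acc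
      = acc.reverse ++ (l.splitOnP (· == d)).modifyHead (cur.reverse ++ ·) := by
  induction fuel with
  | zero =>
    intro l cur acc h
    have : l = [] := List.length_eq_zero_iff.mp (Nat.le_zero.mp h)
    subst this
    simp [PySem.Chars.splitOn.go]
  | succ n ih =>
    intro l cur acc h
    cases l with
    | nil => simp [PySem.Chars.splitOn.go]
    | cons c rest =>
      rw [PySem.Chars.splitOn.go]
      simp only [List.isPrefixOf]
      by_cases hc : d = c
      · subst hc
        simp only [beq_self_eq_true, Bool.true_and]
        rw [if_pos trivial]
        simp only [List.length_cons, List.length_nil, Nat.zero_add, List.drop_succ_cons,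
          List.drop_zero]
        rw [ih rest [] _ (by simpa using Nat.le_of_succ_le_succ h)]
        rcases h' : rest.splitOnP (· == d) with - | ⟨t, ts⟩
        · exact absurd h' (List.splitOnP_ne_nil _ _)
        · simp [List.splitOnP_cons, h']
      · rw [if_neg (by simp [hc])]
        rw [ih rest (c :: cur) acc (by simpa using Nat.le_of_succ_le_succ h)]
        rcases h' : rest.splitOnP (· == d) with - | ⟨t, ts⟩
        · exact absurd h' (List.splitOnP_ne_nil _ _)
        · simp [List.splitOnP_cons, Ne.symm hc, h']

theorem pv_splitOn_single (d : Char) (cs : List Char) :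
    PySem.Chars.splitOn cs [d] = cs.splitOnP (· == d) := by
  have := pv_go d (cs.length + 1) cs [] [] (by omega)
  rw [PySem.Chars.splitOn, this]
  rcases h' : cs.splitOnP (· == d) with - | ⟨t, ts⟩
  · exact absurd h' (List.splitOnP_ne_nil _ _)
  · simp

theorem pv_flatMap (p q : Char → Bool) (cs : List Char) :
    (cs.splitOnP p).flatMap (List.splitOnP q) = cs.splitOnP (fun c => p c || q c) := by
  induction cs with
  | nil => simp
  | cons c cs ih =>
    rcases h' : cs.splitOnP p with - | ⟨t, ts⟩
    · exact absurd h' (List.splitOnP_ne_nil _ _)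
    · rw [h'] at ih
      by_cases hp : p c
      · simp [List.splitOnP_cons, hp, ih, h']
      · rw [List.splitOnP_cons]
        simp only [hp, Bool.false_eq_true, if_false, h', List.modifyHead_cons,
          List.flatMap_cons, Bool.false_or]
        by_cases hq : q c
        · rcases hq' : t.splitOnP q with - | ⟨u, us⟩
          · exact absurd hq' (List.splitOnP_ne_nil _ _)
          · rw [List.splitOnP_cons, if_pos (by simp [hq]),
                List.splitOnP_cons, if_pos (by simp [hq]), ← ih]
            simp
        · rcases hq' : t.splitOnP q with - | ⟨u, us⟩
          · exact absurd hq' (List.splitOnP_ne_nil _ _)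
          · rw [List.splitOnP_cons, if_neg (by simp [hq]),
                List.splitOnP_cons, if_neg (by simp [hp, hq]), ← ih]
            simp [hq']

theorem pvF_nil_cons (ts : List (List Char)) : pvF ([] :: ts) = pvF ts := by
  simp [pvF, PySem.Chars.strip, PySem.Chars.lstrip, PySem.Chars.rstrip]

theorem pvF_cons (t : List Char) (ts : List (List Char)) :
    pvF (t :: ts)
      = (if PySem.Chars.strip t ≠ [] then [String.ofList (PySem.Chars.strip t)] else []) ++ pvF ts := by
  by_cases h : PySem.Chars.strip t = [] <;> simp [pvF, h]

theorem pvF_append (a b : List (List Char)) : pvF (a ++ b) = pvF a ++ pvF b := by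
  simp [pvF, List.filter_append]

theorem pv_strip_cons (c : Char) (t : List Char) (h : PySem.Chars.isspace c = true) :
    PySem.Chars.strip (c :: t) = PySem.Chars.strip t := by
  simp [PySem.Chars.strip, PySem.Chars.lstrip, h]

theorem pv_rstrip_append (c : Char) (t : List Char) (h : PySem.Chars.isspace c = true) :
    PySem.Chars.rstrip (t ++ [c]) = PySem.Chars.rstrip t := by
  simp [PySem.Chars.rstrip, h]

theorem pv_strip_append (c : Char) (t : List Char) (h : PySem.Chars.isspace c = true) :
    PySem.Chars.strip (t ++ [c]) = PySem.Chars.strip t := by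
  by_cases h0 : PySem.Chars.lstrip t = []
  · have hall : ∀ x ∈ t, PySem.Chars.isspace x = true := by
      intro x hx
      by_contra hxs
      have := List.dropWhile_eq_nil_iff.mp h0 x hx
      simp_all [PySem.Chars.lstrip]
    have h1 : PySem.Chars.lstrip (t ++ [c]) = [] := by
      simp only [PySem.Chars.lstrip] at *
      rw [List.dropWhile_eq_nil_iff]
      intro x hx
      rcases List.mem_append.mp hx with hx | hx
      · exact hall x hx
      · simp only [List.mem_singleton] at hx; subst hx; exact h
    simp [PySem.Chars.strip, h0, h1]
  · have h1 : PySem.Chars.lstrip (t ++ [c]) = PySem.Chars.lstrip t ++ [c] := by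
      simp only [PySem.Chars.lstrip] at *
      rw [List.dropWhile_append]
      simp [h0]
    simp only [PySem.Chars.strip, h1]
    exact pv_rstrip_append c _ h

theorem pv_splitOnP_append_neg (p : Char → Bool) (c : Char) (h : p c = false) (cs : List Char) :
    (cs ++ [c]).splitOnP p = pvML (· ++ [c]) (cs.splitOnP p) := by
  induction cs with
  | nil => simp [List.splitOnP_cons, h, pvML]
  | cons c' cs ih =>
    rcases h' : cs.splitOnP p with - | ⟨t, ts⟩
    · exact absurd h' (List.splitOnP_ne_nil _ _)
    · rw [h'] at ih
      by_cases hp : p c'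
      · simp only [List.cons_append, List.splitOnP_cons, hp, if_true, ih, h']
        cases ts <;> simp [pvML]
      · simp only [List.cons_append, List.splitOnP_cons, hp, Bool.false_eq_true, if_false, ih, h']
        cases ts <;> simp [pvML]

theorem pvF_ML (c : Char) (hc : PySem.Chars.isspace c = true) (ts : List (List Char)) :
    pvF (pvML (· ++ [c]) ts) = pvF ts := by
  induction ts with
  | nil => simp [pvML]
  | cons t ts ih =>
    cases ts with
    | nil => simp [pvML, pvF_cons, pv_strip_append c t hc]
    | cons u us =>
      have : pvML (· ++ [c]) (t :: u :: us) = t :: pvML (· ++ [c]) (u :: us) := rfl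
      rw [this, pvF_cons, pvF_cons, ih]

theorem pv_peel_last (c : Char) (hc : PySem.Chars.isspace c = true) (cs : List Char) :
    pvF ((cs ++ [c]).splitOnP pvDelim) = pvF (cs.splitOnP pvDelim) := by
  by_cases hd : pvDelim c = true
  · have : (cs ++ [c]).splitOnP pvDelim = cs.splitOnP pvDelim ++ [[]] := by
      have := List.splitOnP_append_cons pvDelim cs [] c hd
      simpa using this
    rw [this, pvF_append]
    simp [pvF, PySem.Chars.strip, PySem.Chars.lstrip, PySem.Chars.rstrip]
  · rw [pv_splitOnP_append_neg pvDelim c (by simpa using hd) cs, pvF_ML c hc]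

theorem pv_peel_head (c : Char) (hc : PySem.Chars.isspace c = true) (cs : List Char) :
    pvF ((c :: cs).splitOnP pvDelim) = pvF (cs.splitOnP pvDelim) := by
  by_cases hd : pvDelim c = true
  · simp [List.splitOnP_cons, hd, pvF_nil_cons]
  · have hd' : pvDelim c = false := eq_false_of_ne_true hd
    rcases h' : cs.splitOnP pvDelim with - | ⟨t, ts⟩
    · exact absurd h' (List.splitOnP_ne_nil _ _)
    · rw [List.splitOnP_cons, hd', if_neg (by simp), h', List.modifyHead_cons,
        pvF_cons, pvF_cons, pv_strip_cons c t hc]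

theorem pv_ws_left (ws ds : List Char) (h : ∀ c ∈ ws, PySem.Chars.isspace c = true) :
    pvF ((ws ++ ds).splitOnP pvDelim) = pvF (ds.splitOnP pvDelim) := by
  induction ws with
  | nil => simp
  | cons c ws ih =>
    have : (c :: ws) ++ ds = c :: (ws ++ ds) := rfl
    rw [this, pv_peel_head c (h c (by simp)) (ws ++ ds)]
    exact ih (fun x hx => h x (by simp [hx]))

theorem pv_ws_right (ws : List Char) : ∀ (ds : List Char), (∀ c ∈ ws, PySem.Chars.isspace c = true) →
    pvF ((ds ++ ws).splitOnP pvDelim) = pvF (ds.splitOnP pvDelim) := by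
  induction ws with
  | nil => intro ds _; simp
  | cons c ws ih =>
    intro ds h
    have : ds ++ c :: ws = (ds ++ [c]) ++ ws := by simp
    rw [this, ih (ds ++ [c]) (fun x hx => h x (by simp [hx]))]
    exact pv_peel_last c (h c (by simp)) ds

theorem pv_F_strip (cs : List Char) :
    pvF ((PySem.Chars.strip cs).splitOnP pvDelim) = pvF (cs.splitOnP pvDelim) := by
  have hls : PySem.Chars.strip cs = PySem.Chars.rstrip (PySem.Chars.lstrip cs) := rfl
  set ds := PySem.Chars.lstrip cs with hds
  have step2 : pvF ((PySem.Chars.rstrip ds).splitOnP pvDelim) = pvF (ds.splitOnP pvDelim) := by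
    have hdecomp : ds = PySem.Chars.rstrip ds ++ (ds.reverse.takeWhile PySem.Chars.isspace).reverse := by
      simp only [PySem.Chars.rstrip]
      rw [← List.reverse_append]
      rw [List.takeWhile_append_dropWhile]
      simp
    have hws : ∀ c ∈ (ds.reverse.takeWhile PySem.Chars.isspace).reverse, PySem.Chars.isspace c = true := by
      intro c hc
      exact List.mem_takeWhile_imp (List.mem_reverse.mp hc)
    calc pvF ((PySem.Chars.rstrip ds).splitOnP pvDelim)
        = pvF ((PySem.Chars.rstrip ds ++ (ds.reverse.takeWhile PySem.Chars.isspace).reverse).splitOnP pvDelim) :=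
          (pv_ws_right _ _ hws).symm
      _ = pvF (ds.splitOnP pvDelim) := by rw [← hdecomp]
  have step1 : pvF (ds.splitOnP pvDelim) = pvF (cs.splitOnP pvDelim) := by
    have hdecomp : cs = cs.takeWhile PySem.Chars.isspace ++ ds := by
      rw [hds]
      simp [PySem.Chars.lstrip]
    have hws : ∀ c ∈ cs.takeWhile PySem.Chars.isspace, PySem.Chars.isspace c = true :=
      fun c hc => List.mem_takeWhile_imp hc
    calc pvF (ds.splitOnP pvDelim)
        = pvF ((cs.takeWhile PySem.Chars.isspace ++ ds).splitOnP pvDelim) := (pv_ws_left _ _ hws).symm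
      _ = pvF (cs.splitOnP pvDelim) := by rw [← hdecomp]
  rw [hls, step2, step1]

theorem pv_inner (items : List (List Char)) : ∀ (acc : List String),
    items.foldl
      (fun servers item =>
        let item2 := PySem.Chars.strip item
        if item2 ≠ [] then servers ++ [String.ofList item2] else servers)
      acc = acc ++ pvF items := by
  induction items with
  | nil => simp [pvF]
  | cons t ts ih =>
    intro acc
    rw [List.foldl_cons, ih, pvF_cons]
    by_cases h : PySem.Chars.strip t = [] <;> simp [h]

theorem pv_outer (lines : List (List Char)) : ∀ (acc : List String),
    lines.foldl
      (fun servers line =>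
        (line.splitOnP (· == ',')).foldl
          (fun servers item =>
            let item2 := PySem.Chars.strip item
            if item2 ≠ [] then servers ++ [String.ofList item2] else servers)
          servers)
      acc = acc ++ pvF (lines.flatMap (List.splitOnP (· == ','))) := by
  induction lines with
  | nil => simp [pvF]
  | cons l ls ih =>
    intro acc
    rw [List.foldl_cons, pv_inner, ih, List.flatMap_cons, pvF_append, List.append_assoc]

theorem pv_scan (cs : List Char) : ∀ (buf : List Char) (acc : List String),
    (∀ x ∈ buf, pvDelim x = false) →
    (cs ++ ['\n']).foldl pvStep (acc, buf) = (acc ++ pvF ((buf ++ cs).splitOnP pvDelim), []) := by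
  induction cs with
  | nil =>
    intro buf acc h
    have hforall : ∀ x ∈ buf, ¬ pvDelim x = true := fun x hx => by simp [h x hx]
    have hsingle : buf.splitOnP pvDelim = [buf] :=
      List.splitOnP_eq_single pvDelim buf hforall
    simp only [List.nil_append, List.append_nil, List.foldl_cons, List.foldl_nil, hsingle]
    rw [pvStep, if_pos (Or.inl rfl)]
    rw [pvF_cons]
    simp only [pvF, List.map_nil, List.filter_nil, List.append_nil]
    by_cases hb : PySem.Chars.strip buf = []
    · simp [PySem.Str.strip, hb]
    · have hne : PySem.Str.strip (String.ofList buf) ≠ "" := by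
        simp only [PySem.Str.strip, ne_eq]
        intro hcon
        exact hb (by simpa using congrArg String.toList hcon)
      rw [if_pos hne]
      simp [PySem.Str.strip, hb]
  | cons c cs ih =>
    intro buf acc h
    by_cases hd : c = '\n' ∨ c = ','
    · have hdt : pvDelim c = true := by rcases hd with h | h <;> simp [pvDelim, h]
      have hstep : pvStep (acc, buf) c =
          (if PySem.Str.strip (String.ofList buf) ≠ "" then
            acc ++ [PySem.Str.strip (String.ofList buf)] else acc, []) := by
        rw [pvStep, if_pos hd]
      rw [List.cons_append, List.foldl_cons, hstep, ih [] _ (by simp)]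
      have hforall : ∀ x ∈ buf, ¬ pvDelim x = true := fun x hx => by simp [h x hx]
      have hfirst : (buf ++ c :: cs).splitOnP pvDelim = buf :: cs.splitOnP pvDelim :=
        List.splitOnP_first pvDelim buf hforall c hdt cs
      rw [hfirst, pvF_cons]
      simp only [List.nil_append]
      by_cases hb : PySem.Chars.strip buf = []
      · simp [PySem.Str.strip, hb]
      · have hne : PySem.Str.strip (String.ofList buf) ≠ "" := by
          simp only [PySem.Str.strip, ne_eq]
          intro hcon
          exact hb (by simpa using congrArg String.toList hcon)
        rw [if_pos hne, if_pos (by simp [hb])]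
        simp [PySem.Str.strip, List.append_assoc]
    · have hstep : pvStep (acc, buf) c = (acc, buf ++ [c]) := by
        rw [pvStep, if_neg hd]
      rw [List.cons_append, List.foldl_cons, hstep]
      rw [ih (buf ++ [c]) acc]
      · simp
      · intro x hx
        rcases List.mem_append.mp hx with hx | hx
        · exact h x hx
        · simp only [List.mem_singleton] at hx; subst hx
          simp only [pvDelim]
          rcases not_or.mp hd with ⟨h1, h2⟩
          simp [h1, h2]

-- ===== VERDICT (by name: the statement is the Claim_ definition above) =====
theorem parse_servers_input_spec : Claim_equal_parse_servers_input := by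
  intro s _
  unfold Spec_parse_servers_input parse_servers_input parse_servers_input_alt
  simp only [pv_splitOn_single]
  rw [pv_outer, pv_flatMap]
  have hp : (fun c => (c == '\n') || (c == ',')) = pvDelim := rfl
  rw [hp, PySem.Str.toList_strip, pv_F_strip]
  rw [pv_scan s.toList [] [] (by simp)]
  simp
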